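-- pv_equiv track=rewrite | github.com/DeclanNelson178/japan_jukebox | utils.py | match_song
-- ===== SOURCE A (Python) =====
-- def match_song(volume_num, songs):
--     """Find song closest to provided volume number"""
--     songs_and_numbers = []
--     for song in songs:
--         split_song = song.split("_")
--         potential_number = split_song[-1]
--         try:
--             songs_and_numbers.append((song, int(potential_number)))
--         except:
--             pass
--
--     closest_song = None
--     closest_song_dist = float("inf")
--     for song, num in songs_and_numbers:
--         if volume_num == num:
--             return song
--         elif (dist := abs(volume_num - num)) < closest_song_dist:
--             closest_song = song
--             closest_song_dist = dist
--
--     return closest_song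
-- ===== SOURCE B (Python) =====
-- def _trailing_num(song):
--     try:
--         return int(song.split("_")[-1])
--     except ValueError:
--         return None
--
--
-- def match_song(volume_num, songs):
--     """Find song closest to provided volume number"""
--     pairs = [(s, n) for s in songs if (n := _trailing_num(s)) is not None]
--     pairs.sort(key=lambda p: abs(volume_num - p[1]))
--     return pairs[0][0] if pairs else None
-- ===== Notes on version B (the rewrite author's own statement) =====
-- stated objective: alternative
-- what changed: Replaces A's early-return/strict-< min-tracking scan with a stable sort of the parsed (song, number) pairs by distance to volume_num, returning the first element (stability makes ties and exact matches resolve to the same first-encountered song).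
import Mathlib
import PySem

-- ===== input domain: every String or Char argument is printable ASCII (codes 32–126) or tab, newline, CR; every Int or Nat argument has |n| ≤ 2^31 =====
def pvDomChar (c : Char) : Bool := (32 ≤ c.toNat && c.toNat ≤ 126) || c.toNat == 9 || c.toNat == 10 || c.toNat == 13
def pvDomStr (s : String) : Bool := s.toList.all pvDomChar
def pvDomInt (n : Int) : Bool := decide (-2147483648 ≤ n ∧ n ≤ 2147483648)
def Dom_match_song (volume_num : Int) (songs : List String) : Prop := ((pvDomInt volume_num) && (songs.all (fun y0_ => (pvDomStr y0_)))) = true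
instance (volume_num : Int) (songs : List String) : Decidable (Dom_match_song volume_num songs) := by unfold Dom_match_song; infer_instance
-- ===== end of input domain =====

-- B replaces A's early-return/min-tracking scan by a stable sort on distance and taking the
-- first element (objective: alternative decomposition; same parse of the trailing number).

-- ===== PORT A =====
-- second loop of A: early return on exact match, else strict-< running minimum
-- (closest_song : Option String, closest_song_dist : Option Int with none = float("inf"))
def matchLoopA (v : Int) : List (String × Int) → Option String → Option Int → Option String
  | [], closest, _ => closest
  | (song, num) :: rest, closest, closestDist =>
    if v = num then some song
    else
      match closestDist with
      | none => matchLoopA v rest (some song) (some |v - num|)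
      | some d =>
        if |v - num| < d then matchLoopA v rest (some song) (some |v - num|)
        else matchLoopA v rest closest closestDist

def match_song (volume_num : Int) (songs : List String) : Option String :=
  let songs_and_numbers := songs.foldl (fun acc song =>
    match PySem.Str.split? song "_" with
    | none => acc          -- unreachable (sep ≠ ""); bare except would swallow it
    | some parts =>
      match PySem.List.pyGet? parts (-1) with
      | none => acc        -- IndexError, swallowed by the bare except (unreachable)
      | some t =>
        match PySem.Int.ofStr? t with
        | none => acc      -- ValueError from int(), swallowed
        | some n => acc ++ [(song, n)]) []
  matchLoopA volume_num songs_and_numbers none none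

-- ===== PORT B =====
def trailingNum (song : String) : Option Int :=
  match PySem.Str.split? song "_" with
  | none => none
  | some parts =>
    match PySem.List.pyGet? parts (-1) with
    | none => none
    | some t => PySem.Int.ofStr? t

def match_song_alt (volume_num : Int) (songs : List String) : Option String :=
  let pairs := songs.filterMap (fun s => (trailingNum s).map (fun n => (s, n)))
  match PySem.List.sorted pairs (fun p => |volume_num - p.2|) false with
  | [] => none
  | p :: _ => some p.1

-- ===== PRECONDITION & SPEC =====
def Spec_match_song (volume_num : Int) (songs : List String) (out : Option String) : Prop := out = match_song_alt volume_num songs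
instance (volume_num : Int) (songs : List String) (out : Option String) : Decidable (Spec_match_song volume_num songs out) := by unfold Spec_match_song; infer_instance

-- ===== CLAIM (what is proved, stated in full; the proofs are below) =====
def Claim_equal_match_song : Prop := ∀ (volume_num : Int) (songs : List String), Dom_match_song volume_num songs → Spec_match_song volume_num songs (match_song volume_num songs)

-- ===== LEMMAS AND PROOFS =====

-- the "keep the first strict minimum" step both programs reduce to
def bestStep (v : Int) (b : Option (String × Int)) (p : String × Int) : Option (String × Int) :=
  match b with
  | none => some p
  | some q => if |v - p.2| < |v - q.2| then some p else some q

-- A's pair-building foldl equals B's filterMap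
theorem pairs_eq (songs : List String) (acc : List (String × Int)) :
    songs.foldl (fun acc song =>
      match PySem.Str.split? song "_" with
      | none => acc
      | some parts =>
        match PySem.List.pyGet? parts (-1) with
        | none => acc
        | some t =>
          match PySem.Int.ofStr? t with
          | none => acc
          | some n => acc ++ [(song, n)]) acc
    = acc ++ songs.filterMap (fun s => (trailingNum s).map (fun n => (s, n))) := by
  induction songs generalizing acc with
  | nil => simp
  | cons s ss ih =>
    simp only [List.foldl_cons, List.filterMap_cons, ih]
    cases h1 : PySem.Str.split? s "_" with
    | none => simp [trailingNum, h1]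
    | some parts =>
      cases h2 : PySem.List.pyGet? parts (-1) with
      | none => simp [trailingNum, h1, h2]
      | some t =>
        cases h3 : PySem.Int.ofStr? t with
        | none => simp [trailingNum, h1, h2, h3]
        | some n => simp [trailingNum, h1, h2, h3]

-- once an exact match (distance 0) is stored, the fold never replaces it
theorem foldl_bestStep_fixed (v : Int) (q : String × Int) (hq : v = q.2) (l : List (String × Int)) :
    l.foldl (bestStep v) (some q) = some q := by
  induction l with
  | nil => rfl
  | cons p rest ih =>
    have h0 : ¬ (|v - p.2| < |v - q.2|) := by rw [← hq]; simp
    simp only [List.foldl_cons, bestStep, h0, if_false]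
    exact ih

-- A's scan (early return included) computes the first strict minimum
theorem matchLoopA_eq_fold (v : Int) (l : List (String × Int)) (b : Option (String × Int))
    (hb : ∀ q ∈ b, v ≠ q.2) :
    matchLoopA v l (b.map Prod.fst) (b.map (fun q => |v - q.2|))
      = (l.foldl (bestStep v) b).map Prod.fst := by
  induction l generalizing b with
  | nil => cases b <;> rfl
  | cons p rest ih =>
    obtain ⟨s, n⟩ := p
    by_cases hv : v = n
    · have hstep : bestStep v b (s, n) = some (s, n) := by
        cases b with
        | none => rfl
        | some q =>
          have hq : v ≠ q.2 := hb q rfl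
          have : |v - n| < |v - q.2| := by
            rw [← hv]
            simpa using sub_ne_zero.mpr hq
          simp [bestStep, this]
      rw [List.foldl_cons, hstep, foldl_bestStep_fixed v (s, n) hv rest]
      cases b <;> simp [matchLoopA, hv]
    · have hb' : ∀ r ∈ (some (s, n)), v ≠ r.2 := by
        intro r hr
        simp only [Option.mem_def, Option.some.injEq] at hr
        subst hr
        exact hv
      cases b with
      | none =>
        simp only [Option.map_none, matchLoopA, hv, if_false, List.foldl_cons]
        have := ih (b := some (s, n)) hb'
        simpa [bestStep] using this
      | some q =>
        simp only [Option.map_some, matchLoopA, hv, if_false, List.foldl_cons]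
        by_cases hd : |v - n| < |v - q.2|
        · have := ih (b := some (s, n)) hb'
          simpa [bestStep, hd] using this
        · have := ih (b := some q) hb
          simpa [bestStep, hd] using this

-- head of a stable insertion only compares with the old head
theorem head?_insertBy {α : Type} (bef : α → α → Bool) (x : α) (ys : List α) :
    (PySem.List.insertBy bef x ys).head?
      = match ys with
        | [] => some x
        | y :: _ => if bef x y then some x else some y := by
  cases ys with
  | nil => rfl
  | cons y t => by_cases hb : bef x y <;> simp [PySem.List.insertBy, hb]

-- head of the insertion-sort fold is a running first-strict-minimum fold
theorem head?_foldl_insertBy {α : Type} (bef : α → α → Bool) (g : Option α → α → Option α)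
    (hg1 : ∀ x, g none x = some x)
    (hg2 : ∀ h x, g (some h) x = if bef x h then some x else some h)
    (l : List α) (acc : List α) :
    ((l.foldl (fun acc x => PySem.List.insertBy bef x acc) acc).head?)
      = l.foldl g acc.head? := by
  induction l generalizing acc with
  | nil => rfl
  | cons x rest ih =>
    simp only [List.foldl_cons, ih]
    congr 1
    rw [head?_insertBy]
    cases acc with
    | nil => exact (hg1 x).symm
    | cons y t => exact (hg2 y x).symm

-- ===== VERDICT (by name: the statement is the Claim_ definition above) =====
set_option maxHeartbeats 2000000 in
theorem match_song_spec : Claim_equal_match_song := by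
  intro v songs _hdom
  unfold Spec_match_song match_song match_song_alt
  rw [pairs_eq songs []]
  set P := songs.filterMap (fun s => (trailingNum s).map (fun n => (s, n))) with hP
  simp only [List.nil_append]
  have hA : matchLoopA v P none none = (P.foldl (bestStep v) none).map Prod.fst :=
    matchLoopA_eq_fold v P none (by simp)
  rw [hA]
  have hhead : (PySem.List.sorted P (fun p => |v - p.2|) false).head?
      = P.foldl (bestStep v) none := by
    simp only [PySem.List.sorted_eq_foldl_insertBy]
    exact head?_foldl_insertBy (fun a b => decide (|v - a.2| < |v - b.2|)) (bestStep v)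
      (fun x => rfl) (fun h x => by simp [bestStep]) P []
  cases hs : PySem.List.sorted P (fun p => |v - p.2|) false with
  | nil =>
    rw [hs] at hhead
    rw [← hhead]
    rfl
  | cons p t =>
    rw [hs] at hhead
    rw [← hhead]
    rfl
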